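-- pv_equiv track=rewrite | github.com/junjange/uttug-seuja-algorithm | 조준장/level2/숫자 블록.py | get_max_divisor
-- ===== SOURCE A (Python) =====
-- def get_max_divisor(n):
--     if n == 1:
--         return 0
--
--     arr = []
--
--     for i in range(2,int(n**0.5)+1):
--         if n % i == 0:
--             arr.append(i)
--             if n // i <= 10000000:
--                 return n // i
--     if len(arr) >= 1:
--         return arr[-1]
--     return 1
-- ===== SOURCE B (Python) =====
-- def get_max_divisor(n):
--     if n == 1:
--         return 0
--     divisors = {1}
--     for i in range(2, int(n**0.5) + 1):
--         if n % i == 0: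
--             divisors.add(i)
--             divisors.add(n // i)
--     return max(d for d in divisors if d <= 10000000)
-- ===== Notes on version B (the rewrite author's own statement) =====
-- stated objective: simpler
-- what changed: Instead of A's order-dependent early return on the first small factor with a small cofactor plus a fallback list of small factors, B collects all proper divisors (both i and n//i) into a set in one sqrt-loop and then returns the max of those <= 10000000.
import Mathlib
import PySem

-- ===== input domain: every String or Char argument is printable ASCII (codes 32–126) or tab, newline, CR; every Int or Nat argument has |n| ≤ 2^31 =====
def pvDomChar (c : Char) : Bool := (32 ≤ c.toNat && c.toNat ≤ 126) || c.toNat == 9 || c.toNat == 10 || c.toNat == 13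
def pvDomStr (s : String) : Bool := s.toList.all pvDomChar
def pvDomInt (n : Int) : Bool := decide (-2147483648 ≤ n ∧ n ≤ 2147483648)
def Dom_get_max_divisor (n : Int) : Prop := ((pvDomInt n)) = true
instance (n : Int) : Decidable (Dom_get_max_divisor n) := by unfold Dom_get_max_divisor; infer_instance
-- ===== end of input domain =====

-- B collects all proper divisors in one sqrt-loop into a set and takes the max of those ≤ 10000000,
-- replacing A's early-return-on-first-small-cofactor scan with a fallback list (objective: simpler).

-- int(n**0.5): exact on the admitted domain 0 ≤ n ≤ 2^31 (double sqrt is correctly rounded there,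
-- so int(n**0.5) = isqrt(n)); ported by hand as the integer square root.
def intSqrt (n : Int) : Int := (Nat.sqrt n.toNat : Int)

-- ===== PORT A =====
def aLoop (n : Int) (arr : List Int) : List Int → Int
  | [] => if 1 ≤ arr.length then (PySem.List.pyGet? arr (-1)).getD 1 else 1
          -- arr[-1]: reached only with arr nonempty, so getD's default is never used
  | i :: rest =>
    if PySem.Int.mod n i = 0 then
      if PySem.Int.floordiv n i ≤ 10000000 then PySem.Int.floordiv n i
      else aLoop n (arr ++ [i]) rest
    else aLoop n arr rest

def get_max_divisor (n : Int) : Int :=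
  if n = 1 then 0
  else aLoop n [] (PySem.List.pyRange 2 (intSqrt n + 1) 1)

-- ===== PORT B =====
def get_max_divisor_alt (n : Int) : Int :=
  if n = 1 then 0
  else
    let divisors : PySem.Set Int :=
      (PySem.List.pyRange 2 (intSqrt n + 1) 1).foldl
        (fun s i =>
          if PySem.Int.mod n i = 0 then
            PySem.Set.add (PySem.Set.add s i) (PySem.Int.floordiv n i)
          else s)
        (PySem.Set.add PySem.Set.empty 1)
    -- max(...): the filtered list always contains 1, so getD's default is never used
    ((PySem.List.max? (divisors.filter (fun d => d ≤ 10000000)) (fun d => d)).getD 1)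

-- ===== PRECONDITION & SPEC =====
-- A raises TypeError on negative n (n**0.5 is complex); Pre_ excludes exactly those inputs.
def Pre_get_max_divisor (n : Int) : Prop := 0 ≤ n
instance (n : Int) : Decidable (Pre_get_max_divisor n) := by unfold Pre_get_max_divisor; infer_instance
def pvWitness_get_max_divisor : Int := 12

def Spec_get_max_divisor (n : Int) (out : Int) : Prop := out = get_max_divisor_alt n
instance (n : Int) (out : Int) : Decidable (Spec_get_max_divisor n out) := by unfold Spec_get_max_divisor; infer_instance

-- ===== CLAIM (what is proved, stated in full; the proofs are below) =====
def Claim_equal_get_max_divisor : Prop := ∀ (n : Int), Dom_get_max_divisor n → Pre_get_max_divisor n → Spec_get_max_divisor n (get_max_divisor n)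

-- ===== LEMMAS AND PROOFS =====

-- the common specification: P n d ↔ d is a proper divisor of n with d ≤ 10^7 (for n ≥ 2)
def PD (n d : Int) : Prop := 1 ≤ d ∧ d ∣ n ∧ d ≠ n ∧ d ≤ 10000000

lemma sqle (n : Int) (h0 : 0 ≤ n) : intSqrt n * intSqrt n ≤ n := by
  unfold intSqrt
  have h : n = (n.toNat : Int) := by omega
  rw [h]
  have h2 := Nat.sqrt_le' n.toNat
  have h3 : n.toNat.sqrt * n.toNat.sqrt ≤ n.toNat := by nlinarith [h2]
  exact_mod_cast h3

lemma lt_sq (n : Int) (h0 : 0 ≤ n) : n < (intSqrt n + 1) * (intSqrt n + 1) := by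
  unfold intSqrt
  have h : n = (n.toNat : Int) := by omega
  rw [h]
  have h2 := Nat.lt_succ_sqrt' n.toNat
  have h3 : n.toNat < (n.toNat.sqrt + 1) * (n.toNat.sqrt + 1) := by
    have := h2; nlinarith [h2, sq_nonneg (n.toNat.sqrt + 1)]
  exact_mod_cast h3

lemma intSqrt_nonneg (n : Int) : 0 ≤ intSqrt n := by
  unfold intSqrt; exact_mod_cast Nat.zero_le _

lemma one_le_intSqrt (n : Int) (hn : 2 ≤ n) : 1 ≤ intSqrt n := by
  have := lt_sq n (by omega)
  have := intSqrt_nonneg n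
  nlinarith

lemma intSqrt_lt (n : Int) (hn : 2 ≤ n) : intSqrt n < n := by
  have h1 := sqle n (by omega)
  have h2 := one_le_intSqrt n hn
  nlinarith

-- small divisor: its cofactor is ≥ sqrt, divides n, and is a proper divisor
lemma cofac_small (n i : Int) (hn : 2 ≤ n) (hi2 : 2 ≤ i) (hir : i ≤ intSqrt n) (hd : i ∣ n) :
    intSqrt n ≤ n / i ∧ n / i < n ∧ (n / i) ∣ n ∧ n = i * (n / i) := by
  have hipos : 0 < i := by omega
  have heq : n = i * (n / i) := (Int.mul_ediv_cancel' hd).symm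
  have hqpos : 0 < n / i := by nlinarith [heq]
  have hsq := sqle n (by omega)
  have hr1 := one_le_intSqrt n hn
  refine ⟨?_, by nlinarith, ⟨i, (Int.ediv_mul_cancel hd).symm⟩, heq⟩
  by_contra hcon
  push_neg at hcon
  nlinarith [heq, hsq, hqpos, hir, hcon]

lemma cofac_big (n d : Int) (hn : 2 ≤ n) (hd1 : 1 ≤ d) (hdn : d ≠ n) (hdvd : d ∣ n)
    (hbig : intSqrt n < d) :
    2 ≤ n / d ∧ n / d ≤ intSqrt n ∧ n / (n / d) = d ∧ (n / d) ∣ n := by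
  have hdpos : 0 < d := by omega
  have heq : n = d * (n / d) := (Int.mul_ediv_cancel' hdvd).symm
  have hepos : 0 < n / d := by nlinarith [heq]
  have hsq := lt_sq n (by omega)
  have hr0 := intSqrt_nonneg n
  have he2 : 2 ≤ n / d := by
    rcases (by omega : n / d = 1 ∨ 2 ≤ n / d) with h1 | h2
    · exfalso; apply hdn; rw [heq, h1]; ring
    · exact h2
  have her : n / d ≤ intSqrt n := by
    by_contra hcon
    push_neg at hcon
    nlinarith [heq, hsq, hbig, hcon]
  refine ⟨he2, her, ?_, ⟨d, (Int.ediv_mul_cancel hdvd).symm⟩⟩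
  calc n / (n / d) = d * (n / d) / (n / d) := by rw [← heq]
    _ = d := Int.mul_ediv_cancel d (by omega)


lemma mono_cofac (n i e : Int) (hn : 2 ≤ n) (hi : 0 < i) (hie : i ≤ e)
    (hdi : i ∣ n) (hde : e ∣ n) : n / e ≤ n / i := by
  have h1 : n = i * (n / i) := (Int.mul_ediv_cancel' hdi).symm
  have h2 : n = e * (n / e) := (Int.mul_ediv_cancel' hde).symm
  have hq : 0 < n / i := by nlinarith
  have hqe : 0 ≤ n / e := by nlinarith
  nlinarith

-- "m is the greatest proper divisor of n that is ≤ 10^7"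
def Great (n m : Int) : Prop := PD n m ∧ ∀ d, PD n d → d ≤ m

lemma great_unique (n a b : Int) (ha : Great n a) (hb : Great n b) : a = b :=
  le_antisymm (hb.2 a ha.1) (ha.2 b hb.1)

-- A's loop, characterised: early return at the first i with i ∣ n and n//i ≤ 10000000,
-- otherwise the last collected small factor (default 1)
lemma aLoop_find (n : Int) (L : List Int) : ∀ arr,
    aLoop n arr L =
      match L.find? (fun i => decide (PySem.Int.mod n i = 0 ∧ PySem.Int.floordiv n i ≤ 10000000)) with
      | some i => PySem.Int.floordiv n i
      | none => ((arr ++ L.filter (fun i => decide (PySem.Int.mod n i = 0))).getLast?).getD 1 := by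
  induction L with
  | nil =>
    intro arr
    cases arr with
    | nil => simp [aLoop]
    | cons a t => simp [aLoop, PySem.List.pyGet?_neg_one]
  | cons i rest ih =>
    intro arr
    by_cases h1 : PySem.Int.mod n i = 0
    · by_cases h2 : PySem.Int.floordiv n i ≤ 10000000
      · rw [List.find?_cons_of_pos (by simp [h1, h2])]
        simp [aLoop, h1, h2]
      · rw [List.find?_cons_of_neg (by simp [h1, h2]),
            List.filter_cons_of_pos (by simp [h1])]
        have : aLoop n arr (i :: rest) = aLoop n (arr ++ [i]) rest := by
          simp [aLoop, h1, h2]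
        rw [this, ih (arr ++ [i])]
        cases hf : rest.find? (fun i => decide (PySem.Int.mod n i = 0 ∧ PySem.Int.floordiv n i ≤ 10000000)) with
        | some j => simp
        | none => simp
    · rw [List.find?_cons_of_neg (by simp [h1]),
          List.filter_cons_of_neg (by simp [h1])]
      have : aLoop n arr (i :: rest) = aLoop n arr rest := by
        simp [aLoop, h1]
      rw [this, ih arr]

lemma A_great (n : Int) (hn : 2 ≤ n) (hdom : n ≤ 2147483648) :
    Great n (get_max_divisor n) := by
  have h0 : (0:Int) ≤ n := by omega
  have hr1 := one_le_intSqrt n hn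
  have hrlt := intSqrt_lt n hn
  have hsq := sqle n h0
  have hrM : intSqrt n ≤ 10000000 := by nlinarith
  unfold get_max_divisor
  rw [if_neg (by omega), aLoop_find]
  cases hf : (PySem.List.pyRange 2 (intSqrt n + 1) 1).find?
      (fun i => decide (PySem.Int.mod n i = 0 ∧ PySem.Int.floordiv n i ≤ 10000000)) with
  | some i =>
    rw [List.find?_eq_some_iff_append] at hf
    obtain ⟨hpi, as, bs, hLeq, hmin⟩ := hf
    rw [decide_eq_true_iff] at hpi
    obtain ⟨hmod, hflo⟩ := hpi
    have hiL : i ∈ PySem.List.pyRange 2 (intSqrt n + 1) 1 := by rw [hLeq]; simp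
    rw [PySem.List.mem_pyRange_one] at hiL
    have hi2 : 2 ≤ i := hiL.1
    have hir : i ≤ intSqrt n := by omega
    have hdvd : i ∣ n := (PySem.Int.mod_eq_zero_iff_dvd n i).mp hmod
    have hfe : PySem.Int.floordiv n i = n / i := PySem.Int.floordiv_eq_ediv_of_pos (by omega)
    show Great n (PySem.Int.floordiv n i)
    rw [hfe] at hflo ⊢
    obtain ⟨hq_ge, hq_lt, hq_dvd, hq_eq⟩ := cofac_small n i hn hi2 hir hdvd
    constructor
    · exact ⟨by omega, hq_dvd, by omega, hflo⟩
    · intro d hd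
      obtain ⟨hd1, hddvd, hdne, hdM⟩ := hd
      by_cases hdr : d ≤ intSqrt n
      · omega
      · push_neg at hdr
        obtain ⟨he2, her, hed, hedvd⟩ := cofac_big n d hn hd1 hdne hddvd hdr
        -- e := n / d satisfies the search predicate, so i ≤ e by minimality/order
        have hpe : (decide (PySem.Int.mod n (n / d) = 0 ∧ PySem.Int.floordiv n (n / d) ≤ 10000000)) = true := by
          rw [decide_eq_true_iff,
              PySem.Int.floordiv_eq_ediv_of_pos (by omega : (0:Int) < n / d),
              PySem.Int.mod_eq_zero_iff_dvd, hed]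
          exact ⟨hedvd, hdM⟩
        have heL : (n / d) ∈ PySem.List.pyRange 2 (intSqrt n + 1) 1 := by
          rw [PySem.List.mem_pyRange_one]; omega
        rw [hLeq] at heL
        have hie : i ≤ n / d := by
          rcases List.mem_append.mp heL with hin | hin
          · exfalso
            have hc := hmin _ hin
            rw [hpe] at hc
            simp at hc
          · rcases List.mem_cons.mp hin with hin | hin
            · omega
            · have hp := PySem.List.pairwise_lt_pyRange_one 2 (intSqrt n + 1)
              rw [hLeq, List.pairwise_append] at hp
              have := List.rel_of_pairwise_cons hp.2.1 hin
              omega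
        have := mono_cofac n i (n / d) hn (by omega) hie hdvd hedvd
        omega
  | none =>
    rw [List.find?_eq_none] at hf
    have hno : ∀ e, 2 ≤ e → e ≤ intSqrt n → e ∣ n → ¬ (n / e ≤ 10000000) := by
      intro e he2 her hedvd hle
      apply hf e (by rw [PySem.List.mem_pyRange_one]; omega)
      rw [decide_eq_true_iff, PySem.Int.mod_eq_zero_iff_dvd,
          PySem.Int.floordiv_eq_ediv_of_pos (by omega : (0:Int) < e)]
      exact ⟨hedvd, hle⟩
    simp only [List.nil_append]
    cases hg : ((PySem.List.pyRange 2 (intSqrt n + 1) 1).filter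
        (fun i => decide (PySem.Int.mod n i = 0))).getLast? with
    | none =>
      -- no divisor in [2, sqrt n]: n is prime (or a prime power’s worst case); answer 1
      rw [List.getLast?_eq_none_iff] at hg
      have hnod : ∀ d, 2 ≤ d → d ≤ intSqrt n → ¬ d ∣ n := by
        intro d hd2 hdr hdvd
        have : d ∈ (PySem.List.pyRange 2 (intSqrt n + 1) 1).filter
            (fun i => decide (PySem.Int.mod n i = 0)) := by
          rw [List.mem_filter]
          refine ⟨by rw [PySem.List.mem_pyRange_one]; omega, ?_⟩
          rw [decide_eq_true_iff, PySem.Int.mod_eq_zero_iff_dvd]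
          exact hdvd
        rw [hg] at this
        simp at this
      simp only [Option.getD_none]
      constructor
      · exact ⟨le_refl 1, one_dvd n, by omega, by omega⟩
      · intro d hd
        obtain ⟨hd1, hddvd, hdne, hdM⟩ := hd
        by_contra hcon
        push_neg at hcon
        by_cases hdr : d ≤ intSqrt n
        · exact hnod d (by omega) hdr hddvd
        · push_neg at hdr
          obtain ⟨he2, her, hed, hedvd⟩ := cofac_big n d hn hd1 hdne hddvd hdr
          exact hnod (n / d) he2 her hedvd
    | some j =>
      have hjmem := List.mem_of_getLast? hg
      rw [List.mem_filter] at hjmem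
      obtain ⟨hjL, hjp⟩ := hjmem
      rw [PySem.List.mem_pyRange_one] at hjL
      rw [decide_eq_true_iff, PySem.Int.mod_eq_zero_iff_dvd] at hjp
      have hj2 : 2 ≤ j := hjL.1
      have hjr : j ≤ intSqrt n := by omega
      simp only [Option.getD_some]
      constructor
      · exact ⟨by omega, hjp, by omega, by omega⟩
      · intro d hd
        obtain ⟨hd1, hddvd, hdne, hdM⟩ := hd
        by_cases hdr : d ≤ intSqrt n
        · by_cases hd2 : 2 ≤ d
          · -- d is in the filtered list; j is its last element and the list is increasing
            have hdF : d ∈ (PySem.List.pyRange 2 (intSqrt n + 1) 1).filter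
                (fun i => decide (PySem.Int.mod n i = 0)) := by
              rw [List.mem_filter]
              refine ⟨by rw [PySem.List.mem_pyRange_one]; omega, ?_⟩
              rw [decide_eq_true_iff, PySem.Int.mod_eq_zero_iff_dvd]
              exact hddvd
            rw [List.getLast?_eq_some_iff] at hg
            obtain ⟨ys, hys⟩ := hg
            have hsorted : ((PySem.List.pyRange 2 (intSqrt n + 1) 1).filter
                (fun i => decide (PySem.Int.mod n i = 0))).Pairwise (· < ·) :=
              List.Pairwise.sublist List.filter_sublist
                (PySem.List.pairwise_lt_pyRange_one 2 (intSqrt n + 1))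
            rw [hys] at hdF hsorted
            rw [List.pairwise_append] at hsorted
            rcases List.mem_append.mp hdF with hin | hin
            · have := hsorted.2.2 d hin j (by simp)
              omega
            · simp at hin; omega
          · omega
        · push_neg at hdr
          obtain ⟨he2, her, hed, hedvd⟩ := cofac_big n d hn hd1 hdne hddvd hdr
          exact absurd hdM (by have := hno (n / d) he2 her hedvd; rw [hed] at this; omega)

-- membership in B's divisor set
lemma mem_divset (n : Int) (L : List Int) : ∀ (s : PySem.Set Int) (x : Int),
    (x ∈ L.foldl (fun s i =>
        if PySem.Int.mod n i = 0 then
          PySem.Set.add (PySem.Set.add s i) (PySem.Int.floordiv n i)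
        else s) s) ↔
      x ∈ s ∨ ∃ i ∈ L, PySem.Int.mod n i = 0 ∧ (x = i ∨ x = PySem.Int.floordiv n i) := by
  induction L with
  | nil => intro s x; simp
  | cons i rest ih =>
    intro s x
    by_cases h1 : PySem.Int.mod n i = 0
    · simp only [List.foldl_cons, if_pos h1, ih, PySem.Set.mem_add]
      constructor
      · rintro (((hs | hx) | hx) | ⟨j, hj, hjm, hjx⟩)
        · exact Or.inl hs
        · exact Or.inr ⟨i, by simp, h1, Or.inl hx⟩
        · exact Or.inr ⟨i, by simp, h1, Or.inr hx⟩
        · exact Or.inr ⟨j, by simp [hj], hjm, hjx⟩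
      · rintro (hs | ⟨j, hj, hjm, hjx⟩)
        · exact Or.inl (Or.inl (Or.inl hs))
        · rcases List.mem_cons.mp hj with rfl | hj
          · rcases hjx with rfl | rfl
            · exact Or.inl (Or.inl (Or.inr rfl))
            · exact Or.inl (Or.inr rfl)
          · exact Or.inr ⟨j, hj, hjm, hjx⟩
    · simp only [List.foldl_cons, if_neg h1, ih]
      constructor
      · rintro (hs | ⟨j, hj, hjm, hjx⟩)
        · exact Or.inl hs
        · exact Or.inr ⟨j, by simp [hj], hjm, hjx⟩
      · rintro (hs | ⟨j, hj, hjm, hjx⟩)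
        · exact Or.inl hs
        · rcases List.mem_cons.mp hj with rfl | hj
          · exact absurd hjm h1
          · exact Or.inr ⟨j, hj, hjm, hjx⟩

lemma B_great (n : Int) (hn : 2 ≤ n) : Great n (get_max_divisor_alt n) := by
  have h0 : (0:Int) ≤ n := by omega
  have hr1 := one_le_intSqrt n hn
  have hrlt := intSqrt_lt n hn
  have hsq := sqle n h0
  unfold get_max_divisor_alt
  rw [if_neg (by omega)]
  set D := (PySem.List.pyRange 2 (intSqrt n + 1) 1).foldl
      (fun s i =>
        if PySem.Int.mod n i = 0 then
          PySem.Set.add (PySem.Set.add s i) (PySem.Int.floordiv n i)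
        else s) (PySem.Set.add PySem.Set.empty 1) with hD
  show Great n ((PySem.List.max? (D.filter (fun d => decide (d ≤ 10000000))) (fun d => d)).getD 1)
  have hmem : ∀ x, x ∈ D ↔ x = 1 ∨ ∃ i, (2 ≤ i ∧ i ≤ intSqrt n) ∧ i ∣ n ∧ (x = i ∨ x = n / i) := by
    intro x
    rw [hD, mem_divset]
    constructor
    · rintro (hs | ⟨i, hiL, him, hix⟩)
      · left; simpa [PySem.Set.add, PySem.Set.empty] using hs
      · right
        rw [PySem.List.mem_pyRange_one] at hiL
        refine ⟨i, ⟨hiL.1, by omega⟩, (PySem.Int.mod_eq_zero_iff_dvd n i).mp him, ?_⟩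
        rwa [PySem.Int.floordiv_eq_ediv_of_pos (by omega : (0:Int) < i)] at hix
    · rintro (rfl | ⟨i, ⟨hi2, hir⟩, hidvd, hix⟩)
      · left; simp [PySem.Set.add, PySem.Set.empty]
      · right
        refine ⟨i, by rw [PySem.List.mem_pyRange_one]; omega,
          (PySem.Int.mod_eq_zero_iff_dvd n i).mpr hidvd, ?_⟩
        rwa [PySem.Int.floordiv_eq_ediv_of_pos (by omega : (0:Int) < i)]
  have hPD : ∀ x ∈ D.filter (fun d => d ≤ 10000000), PD n x := by
    intro x hx
    rw [List.mem_filter, decide_eq_true_iff] at hx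
    obtain ⟨hxD, hxM⟩ := hx
    rcases (hmem x).mp hxD with rfl | ⟨i, ⟨hi2, hir⟩, hidvd, hix⟩
    · exact ⟨le_refl 1, one_dvd n, by omega, by omega⟩
    · rcases hix with rfl | rfl
      · exact ⟨by omega, hidvd, by omega, hxM⟩
      · obtain ⟨hq_ge, hq_lt, hq_dvd, _⟩ := cofac_small n i hn hi2 hir hidvd
        exact ⟨by omega, hq_dvd, by omega, hxM⟩
  have hInF : ∀ d, PD n d → d ∈ D.filter (fun d => d ≤ 10000000) := by
    intro d hd
    obtain ⟨hd1, hddvd, hdne, hdM⟩ := hd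
    rw [List.mem_filter, decide_eq_true_iff]
    refine ⟨?_, hdM⟩
    rw [hmem]
    by_cases hdone : d = 1
    · exact Or.inl hdone
    · right
      by_cases hdr : d ≤ intSqrt n
      · exact ⟨d, ⟨by omega, hdr⟩, hddvd, Or.inl rfl⟩
      · push_neg at hdr
        obtain ⟨he2, her, hed, hedvd⟩ := cofac_big n d hn hd1 hdne hddvd hdr
        exact ⟨n / d, ⟨he2, her⟩, hedvd, Or.inr hed.symm⟩
  have hone : (1:Int) ∈ D.filter (fun d => d ≤ 10000000) :=
    hInF 1 ⟨le_refl 1, one_dvd n, by omega, by omega⟩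
  cases hm : PySem.List.max? (D.filter (fun d => d ≤ 10000000)) (fun d => d) with
  | none =>
    rw [PySem.List.max?_eq_none_iff] at hm
    rw [hm] at hone
    simp at hone
  | some m =>
    simp only [Option.getD_some]
    constructor
    · exact hPD m (PySem.List.max?_mem hm)
    · intro d hd
      exact PySem.List.max?_isMax hm d (hInF d hd)


-- ===== VERDICT (by name: the statement is the Claim_ definition above) =====
theorem get_max_divisor_spec : Claim_equal_get_max_divisor := by
  intro n hdom hpre
  unfold Spec_get_max_divisor
  unfold Dom_get_max_divisor pvDomInt at hdom
  rw [decide_eq_true_iff] at hdom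
  unfold Pre_get_max_divisor at hpre
  rcases (by omega : n = 0 ∨ n = 1 ∨ 2 ≤ n) with rfl | rfl | hn
  · decide
  · decide
  · exact great_unique n _ _ (A_great n hn hdom.2) (B_great n hn)
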